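-- pv_equiv track=rewrite | github.com/Vali2804/Python-course | lab2/lab2.py | pb4
-- ===== SOURCE A (Python) =====
-- def pb4(notes, moves, start_position):
--     song_length = len(notes)
--     composed_song = []
--     composed_song.append(notes[start_position])
--     for move in moves:
--         start_position = (start_position + move) % song_length
--         composed_song.append(notes[start_position])
--
--     return composed_song
-- ===== SOURCE B (Python) =====
-- def pb4(notes, moves, start_position):
--     # Divide-and-conquer: the notes visited by a block of moves starting at a
--     # known position are the two half-blocks' visits, the right half started at
--     # (pos + sum(left half)) % n -- correct because positions evolve additively mod n.
--     n = len(notes)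
--     head = notes[start_position]
--
--     def walk(pos, ms):
--         # ms is nonempty; returns the notes visited after each move of ms
--         if len(ms) == 1:
--             return [notes[(pos + ms[0]) % n]]
--         mid = len(ms) // 2
--         left = walk(pos, ms[:mid])
--         return left + walk((pos + sum(ms[:mid])) % n, ms[mid:])
--
--     return [head] + (walk(start_position, moves) if moves else [])
-- ===== Notes on version B (the rewrite author's own statement) =====
-- stated objective: alternative
-- what changed: B replaces A's single left-to-right walk threading a mutable position with a divide-and-conquer over the moves list: each half-block is walked independently, the right half started at (pos + sum(left half)) % n, exploiting additivity of positions mod n.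
import Mathlib
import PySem

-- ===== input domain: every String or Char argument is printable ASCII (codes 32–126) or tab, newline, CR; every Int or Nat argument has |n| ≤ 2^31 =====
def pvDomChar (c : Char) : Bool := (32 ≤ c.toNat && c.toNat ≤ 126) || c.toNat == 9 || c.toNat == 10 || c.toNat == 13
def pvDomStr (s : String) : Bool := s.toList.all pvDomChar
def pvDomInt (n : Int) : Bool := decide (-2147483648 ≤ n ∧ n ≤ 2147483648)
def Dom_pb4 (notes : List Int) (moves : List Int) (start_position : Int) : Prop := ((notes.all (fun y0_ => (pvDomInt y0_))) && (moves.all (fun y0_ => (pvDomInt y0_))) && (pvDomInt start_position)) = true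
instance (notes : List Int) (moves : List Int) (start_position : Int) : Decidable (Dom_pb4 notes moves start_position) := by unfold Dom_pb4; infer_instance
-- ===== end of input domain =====

-- B replaces A's single walk threading a mutable position with a divide-and-conquer
-- over the moves list (right half restarted at (pos + sum left) % n); same return value.


-- ===== PORT A =====
def pb4 (notes : List Int) (moves : List Int) (start_position : Int) : List Int :=
  let song_length : Int := (notes.length : Int)
  let composed_song : List Int := []
  let composed_song := composed_song ++ [(PySem.List.pyGet? notes start_position).getD 0]
  (moves.foldl (fun (st : Int × List Int) move =>
      let p := PySem.Int.mod (st.1 + move) song_length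
      (p, st.2 ++ [(PySem.List.pyGet? notes p).getD 0]))
    (start_position, composed_song)).2

-- ===== PORT B =====
-- B's inner 'walk(pos, ms)': ms is always nonempty in Source B (walk is only ever called
-- with a nonempty block); the ms = [] branch is an unreachable termination guard.
def pb4AltWalk (notes : List Int) (n : Int) (pos : Int) (ms : List Int) : List Int :=
  if ms.length = 1 then
    [(PySem.List.pyGet? notes (PySem.Int.mod (pos + (PySem.List.pyGet? ms 0).getD 0) n)).getD 0]
  else if _h : ms.length = 0 then []
  else
    let mid : Nat := ms.length / 2
    pb4AltWalk notes n pos (PySem.List.slice ms none (some (mid : Int))) ++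
      pb4AltWalk notes n
        (PySem.Int.mod (pos + (PySem.List.slice ms none (some (mid : Int))).sum) n)
        (PySem.List.slice ms (some (mid : Int)) none)
termination_by ms.length
decreasing_by
  · rw [PySem.List.slice_to_natCast]; simp; omega
  · rw [PySem.List.slice_from_natCast]; simp; omega

def pb4_alt (notes : List Int) (moves : List Int) (start_position : Int) : List Int :=
  let n : Int := (notes.length : Int)
  let head : Int := (PySem.List.pyGet? notes start_position).getD 0
  [head] ++ (if moves.isEmpty then [] else pb4AltWalk notes n start_position moves)

-- ===== PRECONDITION & SPEC =====
-- Pre_ excludes exactly the inputs where Python A raises: an out-of-range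
-- start_position (IndexError on the first append; in particular notes = []).
def Pre_pb4 (notes : List Int) (moves : List Int) (start_position : Int) : Prop :=
  PySem.Raise.InRange notes.length start_position
instance (notes : List Int) (moves : List Int) (start_position : Int) : Decidable (Pre_pb4 notes moves start_position) := by unfold Pre_pb4; infer_instance

def pvWitness_pb4 : List Int × List Int × Int := ([3, 1, 4, 1], [2, -5, 7], 1)

def Spec_pb4 (notes : List Int) (moves : List Int) (start_position : Int) (out : List Int) : Prop := out = pb4_alt notes moves start_position
instance (notes : List Int) (moves : List Int) (start_position : Int) (out : List Int) : Decidable (Spec_pb4 notes moves start_position out) := by unfold Spec_pb4; infer_instance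

-- ===== CLAIM (what is proved, stated in full; the proofs are below) =====
def Claim_equal_pb4 : Prop := ∀ (notes : List Int) (moves : List Int) (start_position : Int), Dom_pb4 notes moves start_position → Pre_pb4 notes moves start_position → Spec_pb4 notes moves start_position (pb4 notes moves start_position)

-- ===== LEMMAS AND PROOFS =====

-- A's loop body, named for the lemmas.
def pbStep (notes : List Int) (n : Int) : Int × List Int → Int → Int × List Int :=
  fun st move =>
    let p := PySem.Int.mod (st.1 + move) n
    (p, st.2 ++ [(PySem.List.pyGet? notes p).getD 0])

-- the accumulator splits off
lemma pb4_loop_append (notes : List Int) (n : Int) :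
    ∀ (ms : List Int) (st : Int × List Int),
      (ms.foldl (pbStep notes n) st).2
        = st.2 ++ (ms.foldl (pbStep notes n) (st.1, [])).2 := by
  intro ms
  induction ms with
  | nil => intro st; simp
  | cons m ms ih =>
      intro st
      simp only [List.foldl_cons, pbStep, List.nil_append]
      rw [ih (PySem.Int.mod (st.1 + m) n,
              st.2 ++ [(PySem.List.pyGet? notes (PySem.Int.mod (st.1 + m) n)).getD 0]),
          ih (PySem.Int.mod (st.1 + m) n,
              [(PySem.List.pyGet? notes (PySem.Int.mod (st.1 + m) n)).getD 0])]
      simp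

-- the threaded position ignores the accumulator
lemma pb4_loop_fst (notes : List Int) (n : Int) :
    ∀ (ms : List Int) (st : Int × List Int),
      (ms.foldl (pbStep notes n) st).1
        = ms.foldl (fun q m => PySem.Int.mod (q + m) n) st.1 := by
  intro ms
  induction ms with
  | nil => intro st; simp
  | cons m ms ih => intro st; simp only [List.foldl_cons, pbStep]; exact ih _

-- the final position of a nonempty block is (p + sum) % n
lemma pb4_pos_sum (n : Int) (hn : 0 < n) :
    ∀ (ms : List Int) (p : Int), ms ≠ [] →
      ms.foldl (fun q m => PySem.Int.mod (q + m) n) p = (p + ms.sum) % n := by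
  intro ms
  induction ms with
  | nil => intro p h; exact absurd rfl h
  | cons m ms ih =>
      intro p _
      simp only [List.foldl_cons]
      rcases eq_or_ne ms ([] : List Int) with h | h
      · subst h
        simp [PySem.Int.mod_eq_emod_of_pos hn]
      · rw [ih _ h, PySem.Int.mod_eq_emod_of_pos hn, Int.emod_add_emod]
        simp [add_assoc]

-- walk equals A's loop tail on every nonempty block
lemma pb4_walk_eq (notes : List Int) (n : Int) (hn : 0 < n) :
    ∀ (k : Nat) (ms : List Int) (p : Int), ms.length ≤ k → ms ≠ [] →
      pb4AltWalk notes n p ms = (ms.foldl (pbStep notes n) (p, [])).2 := by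
  intro k
  induction k with
  | zero => intro ms p hk hne; cases ms with
      | nil => exact absurd rfl hne
      | cons m ms => simp at hk
  | succ k ih =>
      intro ms p hk hne
      rw [pb4AltWalk]
      by_cases h1 : ms.length = 1
      · rcases ms with _ | ⟨m, ms⟩
        · exact absurd rfl hne
        · have : ms = [] := by simpa using h1
          subst this
          simp [pbStep, PySem.List.pyGet?, PySem.List.pyIdx?]
      · have h0 : ms.length ≠ 0 := by
          intro h; exact hne (List.length_eq_zero_iff.mp h)
        rw [if_neg h1, dif_neg h0]
        have h2 : 2 ≤ ms.length := by omega
        set mid : Nat := ms.length / 2 with hmid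
        have hmid1 : 1 ≤ mid := by omega
        have hmidlt : mid < ms.length := by omega
        change pb4AltWalk notes n p (PySem.List.slice ms none (some (mid : Int))) ++
            pb4AltWalk notes n
              (PySem.Int.mod (p + (PySem.List.slice ms none (some (mid : Int))).sum) n)
              (PySem.List.slice ms (some (mid : Int)) none)
          = (List.foldl (pbStep notes n) (p, []) ms).2
        rw [PySem.List.slice_to_natCast, PySem.List.slice_from_natCast]
        have htake : (ms.take mid) ≠ [] := by
          intro h
          have := congrArg List.length h
          simp [Nat.min_eq_left (le_of_lt hmidlt)] at this
          omega
        have hdrop : (ms.drop mid) ≠ [] := by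
          intro h
          have := congrArg List.length h
          simp at this
          omega
        rw [ih (ms.take mid) p (by simp; omega) htake,
            ih (ms.drop mid) _ (by simp; omega) hdrop]
        conv_rhs => rw [← List.take_append_drop mid ms, List.foldl_append]
        rw [pb4_loop_append notes n (ms.drop mid)
              (List.foldl (pbStep notes n) (p, []) (ms.take mid)),
            pb4_loop_fst notes n (ms.take mid) (p, []),
            pb4_pos_sum n hn _ _ htake,
            PySem.Int.mod_eq_emod_of_pos hn]

-- ===== VERDICT (by name: the statement is the Claim_ definition above) =====
theorem pb4_spec : Claim_equal_pb4 := by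
  intro notes moves start_position _ hpre
  have hn : 0 < (notes.length : Int) := by
    unfold Pre_pb4 PySem.Raise.InRange at hpre
    omega
  unfold Spec_pb4
  have hA : pb4 notes moves start_position
      = (moves.foldl (pbStep notes (notes.length : Int))
          (start_position, [(PySem.List.pyGet? notes start_position).getD 0])).2 := rfl
  have hB : pb4_alt notes moves start_position
      = [(PySem.List.pyGet? notes start_position).getD 0] ++
          (if moves.isEmpty then [] else
            pb4AltWalk notes (notes.length : Int) start_position moves) := rfl
  rw [hA, hB]
  rcases eq_or_ne moves ([] : List Int) with h | h
  · subst h; simp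
  · have he : moves.isEmpty = false := by simpa [List.isEmpty_iff] using h
    rw [he, if_neg (by simp),
        pb4_loop_append notes (notes.length : Int) moves
          (start_position, [(PySem.List.pyGet? notes start_position).getD 0]),
        pb4_walk_eq notes _ hn moves.length moves start_position le_rfl h]
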